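-- pv_equiv track=rewrite | github.com/cirosantilli/project-euler-solutions | solvers/940.py | S
-- ===== SOURCE A (Python) =====
-- MOD = 1123581313
--
-- def mat_mul(A, B, mod=MOD):
--     a, b, c, d = A
--     e, f, g, h = B
--     return (
--         (a * e + b * g) % mod,
--         (a * f + b * h) % mod,
--         (c * e + d * g) % mod,
--         (c * f + d * h) % mod,
--     )
--
-- def mat_pow(M, exp, mod=MOD):
--     # Binary exponentiation
--     result = (1, 0, 0, 1)  # identity
--     base = M
--     e = exp
--     while e > 0:
--         if e & 1:
--             result = mat_mul(result, base, mod)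
--         base = mat_mul(base, base, mod)
--         e >>= 1
--     return result
--
-- def mat_vec(M, x, y, mod=MOD):
--     a, b, c, d = M
--     return ((a * x + b * y) % mod, (c * x + d * y) % mod)
--
-- MAT_M = (1, 1, 3, 2)
--
-- MAT_N = (MOD - 1, 1, 1, 2)  # [[-1,1],[1,2]] modulo MOD
--
-- def fibs_upto(k):
--     """Return [f_0, f_1, ..., f_k] with f_0=0, f_1=1."""
--     if k < 0:
--         return []
--     if k == 0:
--         return [0]
--     fib = [0, 1]
--     for _ in range(2, k + 1):
--         fib.append(fib[-1] + fib[-2])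
--     return fib
--
-- def precompute_powers(exponents, base_matrix):
--     """Map each exponent e to base_matrix^e modulo MOD."""
--     out = {}
--     for e in exponents:
--         out[e] = mat_pow(base_matrix, e)
--     return out
--
-- def S(k, mod=MOD):
--     fib = fibs_upto(k)
--     idx_vals = [fib[i] for i in range(2, k + 1)]
--
--     # Cache matrix powers for exactly the needed exponents.
--     unique = sorted(set(idx_vals))
--     powM = precompute_powers(unique, MAT_M)
--     powN = precompute_powers(unique, MAT_N)
--
--     total = 0
--     for m in idx_vals:
--         # Precompute base vector (A(m,0), A(m+1,0)) once per m.
--         p0, p1 = mat_vec(powM[m], 0, 1, mod)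
--         q0 = (p0 + p1) % mod
--         for n in idx_vals:
--             a_mn, _ = mat_vec(powN[n], p0, q0, mod)
--             total += a_mn
--         total %= mod
--     return total % mod
-- ===== SOURCE B (Python) =====
-- MOD = 1123581313
--
-- def _mat_mul(A, B, mod):
--     a, b, c, d = A
--     e, f, g, h = B
--     return ((a*e + b*g) % mod, (a*f + b*h) % mod,
--             (c*e + d*g) % mod, (c*f + d*h) % mod)
--
-- def _mat_pow(M, exp, mod):
--     result = (1, 0, 0, 1)
--     base = M
--     e = exp
--     while e > 0:
--         if e & 1:
--             result = _mat_mul(result, base, mod)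
--         base = _mat_mul(base, base, mod)
--         e >>= 1
--     return result
--
-- def S(k, mod=MOD):
--     # Factor the double sum: sum_m sum_n (a_n*p0_m + b_n*q0_m) = sa*sp + sb*sq,
--     # computed in ONE pass over the Fibonacci indices f_2..f_k.
--     sa = sb = sp = sq = 0
--     x, y = 1, 1  # (fib(i-1), fib(i)) with i starting at 2
--     for _ in range(2, k + 1):
--         f = y
--         na, nb, _, _ = _mat_pow((MOD - 1, 1, 1, 2), f, MOD)
--         pm = _mat_pow((1, 1, 3, 2), f, MOD)
--         p0 = pm[1] % mod
--         p1 = pm[3] % mod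
--         q0 = (p0 + p1) % mod
--         sa += na
--         sb += nb
--         sp += p0
--         sq += q0
--         x, y = y, x + y
--     return (sa * sp + sb * sq) % mod
-- ===== Notes on version B (the rewrite author's own statement) =====
-- stated objective: alternative
-- what changed: B factors the double sum sum_m sum_n (a_n*p0_m + b_n*q0_m) into (sum a_n)*(sum p0_m) + (sum b_n)*(sum q0_m) and computes everything in one pass over the Fibonacci indices, dropping A's inner loop of matrix-vector products as well as the fib list, the sorted-unique pass and both power dictionaries; intended as faster (measured ~1.5-1.7x, dominated for both by the shared big-integer matrix powers).
-- outside the precondition, e.g. on S(5, 0): A raises ZeroDivisionError, B raises ZeroDivisionError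
import Mathlib
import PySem

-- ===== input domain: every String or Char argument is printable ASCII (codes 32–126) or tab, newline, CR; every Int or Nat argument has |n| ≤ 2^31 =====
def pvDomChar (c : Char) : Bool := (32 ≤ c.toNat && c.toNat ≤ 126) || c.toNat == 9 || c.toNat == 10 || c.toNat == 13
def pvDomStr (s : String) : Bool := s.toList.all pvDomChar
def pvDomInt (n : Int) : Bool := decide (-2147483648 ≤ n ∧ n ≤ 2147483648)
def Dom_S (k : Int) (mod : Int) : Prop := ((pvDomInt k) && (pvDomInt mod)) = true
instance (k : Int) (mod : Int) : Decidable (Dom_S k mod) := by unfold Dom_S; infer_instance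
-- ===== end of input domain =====

-- B factors the double sum Σ_m Σ_n a(m,n) into (Σ_n row)·(Σ_m vec) and computes it in ONE pass
-- over the Fibonacci indices, with no fib list, no sorted-unique pass and no power dictionaries
-- (objective: alternative; A's inner loop over n disappears, but both remain dominated by the
-- big-integer matrix powers, so no asymptotic speed is claimed).

-- ===== PORT A =====
def MODc : Int := 1123581313

def matMul : (Int × Int × Int × Int) → (Int × Int × Int × Int) → Int → (Int × Int × Int × Int)
  | (a, b, c, d), (e, f, g, h), mod =>
    (PySem.Int.mod (a * e + b * g) mod, PySem.Int.mod (a * f + b * h) mod,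
     PySem.Int.mod (c * e + d * g) mod, PySem.Int.mod (c * f + d * h) mod)

-- the 'while e > 0' loop of mat_pow
def matPowLoop (result base : Int × Int × Int × Int) (e : Int) (mod : Int) :
    Int × Int × Int × Int :=
  if _h : 0 < e then
    matPowLoop (if PySem.Int.band e 1 ≠ 0 then matMul result base mod else result)
      (matMul base base mod) (e >>> (1 : Nat)) mod
  else result
termination_by e.toNat
decreasing_by
  have : e >>> (1 : Nat) = e / 2 := by simp [Int.shiftRight_eq_div_pow]
  omega

def matPow (M : Int × Int × Int × Int) (exp : Int) (mod : Int) : Int × Int × Int × Int :=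
  matPowLoop (1, 0, 0, 1) M exp mod

def matVec (M : Int × Int × Int × Int) (x y : Int) (mod : Int) : Int × Int :=
  (PySem.Int.mod (M.1 * x + M.2.1 * y) mod, PySem.Int.mod (M.2.2.1 * x + M.2.2.2 * y) mod)

def matM : Int × Int × Int × Int := (1, 1, 3, 2)
def matN : Int × Int × Int × Int := (MODc - 1, 1, 1, 2)

-- the loop body of fibs_upto: fib.append(fib[-1] + fib[-2])
def fibStep (fib : List Int) (_ : Int) : List Int :=
  fib ++ [PySem.List.pyGetD fib (-1) 0 + PySem.List.pyGetD fib (-2) 0]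

def fibsUpto (k : Int) : List Int :=
  if k < 0 then []
  else if k = 0 then [0]
  else (PySem.List.pyRange 2 (k + 1)).foldl fibStep [0, 1]

def precomputePowers (exponents : List Int) (base : Int × Int × Int × Int) :
    PySem.Dict Int (Int × Int × Int × Int) :=
  exponents.foldl (fun out e => out.insert e (matPow base e MODc)) PySem.Dict.empty

def S (k : Int) (mod : Int) : Int :=
  let fib := fibsUpto k
  let idxVals := (PySem.List.pyRange 2 (k + 1)).map (fun i => PySem.List.pyGetD fib i 0)
  let unique := PySem.List.sorted (PySem.Set.ofList idxVals) (fun x => x)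
  let powM := precomputePowers unique matM
  let powN := precomputePowers unique matN
  let total := idxVals.foldl (fun total m =>
    let p := matVec (powM.getD m (0, 0, 0, 0)) 0 1 mod
    let q0 := PySem.Int.mod (p.1 + p.2) mod
    PySem.Int.mod
      (idxVals.foldl (fun t n => t + (matVec (powN.getD n (0, 0, 0, 0)) p.1 q0 mod).1) total)
      mod) 0
  PySem.Int.mod total mod

-- ===== PORT B =====
-- the loop body of B: state (x, y, sa, sb, sp, sq)
def stepB (mod : Int) (st : Int × Int × Int × Int × Int × Int) (_ : Int) :
    Int × Int × Int × Int × Int × Int :=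
  let f := st.2.1
  let pN := matPow matN f MODc
  let pM := matPow matM f MODc
  let p0 := PySem.Int.mod pM.2.1 mod
  let p1 := PySem.Int.mod pM.2.2.2 mod
  let q0 := PySem.Int.mod (p0 + p1) mod
  (st.2.1, st.1 + st.2.1, st.2.2.1 + pN.1, st.2.2.2.1 + pN.2.1,
   st.2.2.2.2.1 + p0, st.2.2.2.2.2 + q0)

def S_alt (k : Int) (mod : Int) : Int :=
  let st := (PySem.List.pyRange 2 (k + 1)).foldl (stepB mod) (1, 1, 0, 0, 0, 0)
  PySem.Int.mod (st.2.2.1 * st.2.2.2.2.1 + st.2.2.2.1 * st.2.2.2.2.2) mod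

-- ===== PRECONDITION & SPEC =====
-- Pre_S excludes only mod = 0, where Python's '%' raises ZeroDivisionError.
def Pre_S (k : Int) (mod : Int) : Prop := mod ≠ 0
instance (k : Int) (mod : Int) : Decidable (Pre_S k mod) := by unfold Pre_S; infer_instance
def pvWitness_S : Int × Int := (6, 97)

def Spec_S (k : Int) (mod : Int) (out : Int) : Prop := out = S_alt k mod
instance (k : Int) (mod : Int) (out : Int) : Decidable (Spec_S k mod out) := by unfold Spec_S; infer_instance

-- ===== CLAIM (what is proved, stated in full; the proofs are below) =====
def Claim_equal_S : Prop := ∀ (k : Int) (mod : Int), Dom_S k mod → Pre_S k mod → Spec_S k mod (S k mod)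

-- ===== LEMMAS AND PROOFS =====

-- proof-side abbreviations for the quantities both programs compute
def aN (n : Int) : Int := (matPow matN n MODc).1
def bN (n : Int) : Int := (matPow matN n MODc).2.1
def pF (b m : Int) : Int := PySem.Int.mod ((matPow matM m MODc).2.1) b
def qF (b m : Int) : Int :=
  PySem.Int.mod (pF b m + PySem.Int.mod ((matPow matM m MODc).2.2.2) b) b
def F (i : Int) : Int := (Nat.fib i.toNat : Int)
def mkL (k : Int) : List Int := (PySem.List.pyRange 2 (k + 1)).map F

theorem pmod_sub_dvd (x b : Int) : b ∣ (PySem.Int.mod x b - x) := by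
  refine ⟨-(PySem.Int.floordiv x b), ?_⟩
  have h := PySem.Int.floordiv_mul_add_mod x b
  linarith [h]

theorem pmod_congr {b x y : Int} (hb : b ≠ 0) (h : b ∣ (x - y)) :
    PySem.Int.mod x b = PySem.Int.mod y b := by
  have hx := pmod_sub_dvd x b
  have hy := pmod_sub_dvd y b
  have hd : b ∣ (PySem.Int.mod x b - PySem.Int.mod y b) := by
    have heq : PySem.Int.mod x b - PySem.Int.mod y b
        = (PySem.Int.mod x b - x) - (PySem.Int.mod y b - y) + (x - y) := by ring
    rw [heq]; exact dvd_add (dvd_sub hx hy) h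
  obtain ⟨c, hc⟩ := hd
  rcases lt_or_gt_of_ne hb with hneg | hpos
  · have b1 := PySem.Int.mod_neg_bounds x hneg
    have b2 := PySem.Int.mod_neg_bounds y hneg
    have hc0 : c = 0 := by nlinarith [b1.1, b1.2, b2.1, b2.2]
    nlinarith [hc0]
  · have b1 := PySem.Int.mod_nonneg x hpos
    have b2 := PySem.Int.mod_nonneg y hpos
    have b3 := PySem.Int.mod_lt x hpos
    have b4 := PySem.Int.mod_lt y hpos
    have hc0 : c = 0 := by nlinarith
    nlinarith [hc0]

theorem dvd_sum_sub {b : Int} {L : List Int} {f g : Int → Int}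
    (h : ∀ x ∈ L, b ∣ (f x - g x)) :
    b ∣ ((L.map f).sum - (L.map g).sum) := by
  induction L with
  | nil => simp
  | cons x L ih =>
    simp only [List.map_cons, List.sum_cons]
    have h1 := h x (by simp)
    have h2 := ih (fun y hy => h y (by simp [hy]))
    have heq : f x + (L.map f).sum - (g x + (L.map g).sum)
        = (f x - g x) + ((L.map f).sum - (L.map g).sum) := by ring
    rw [heq]; exact dvd_add h1 h2

theorem foldA_dvd (b : Int) (h : Int → Int) (L : List Int) :
    ∀ t : Int, b ∣ (L.foldl (fun t m => PySem.Int.mod (t + h m) b) t - (t + (L.map h).sum)) := by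
  induction L with
  | nil => intro t; simp
  | cons m L ih =>
    intro t
    simp only [List.foldl_cons, List.map_cons, List.sum_cons]
    have h1 := ih (PySem.Int.mod (t + h m) b)
    have h2 := pmod_sub_dvd (t + h m) b
    have heq : L.foldl (fun t m => PySem.Int.mod (t + h m) b) (PySem.Int.mod (t + h m) b)
        - (t + (h m + (L.map h).sum))
        = (L.foldl (fun t m => PySem.Int.mod (t + h m) b) (PySem.Int.mod (t + h m) b)
            - (PySem.Int.mod (t + h m) b + (L.map h).sum))
          + (PySem.Int.mod (t + h m) b - (t + h m)) := by ring
    rw [heq]; exact dvd_add h1 h2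

theorem core (b : Int) (hb : b ≠ 0) (L : List Int) (aF bF pG qG : Int → Int) :
    PySem.Int.mod (L.foldl (fun t m =>
        PySem.Int.mod (t + (L.map (fun n =>
          PySem.Int.mod (aF n * pG m + bF n * qG m) b)).sum) b) 0) b
    = PySem.Int.mod ((L.map aF).sum * (L.map pG).sum
        + (L.map bF).sum * (L.map qG).sum) b := by
  apply pmod_congr hb
  have h1 := foldA_dvd b (fun m => (L.map (fun n =>
      PySem.Int.mod (aF n * pG m + bF n * qG m) b)).sum) L 0
  have h2 : b ∣ ((L.map (fun m => (L.map (fun n =>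
        PySem.Int.mod (aF n * pG m + bF n * qG m) b)).sum)).sum
      - (L.map (fun m => (L.map (fun n => aF n * pG m + bF n * qG m)).sum)).sum) := by
    apply dvd_sum_sub
    intro m _
    apply dvd_sum_sub
    intro n _
    exact pmod_sub_dvd _ _
  have h3 : (L.map (fun m => (L.map (fun n => aF n * pG m + bF n * qG m)).sum)).sum
      = (L.map aF).sum * (L.map pG).sum + (L.map bF).sum * (L.map qG).sum := by
    have hper : ∀ m : Int, (L.map (fun n => aF n * pG m + bF n * qG m)).sum
        = (L.map aF).sum * pG m + (L.map bF).sum * qG m := by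
      intro m
      rw [PySem.List.sum_map_add_int, List.sum_map_mul_right, List.sum_map_mul_right]
    calc (L.map (fun m => (L.map (fun n => aF n * pG m + bF n * qG m)).sum)).sum
        = (L.map (fun m => (L.map aF).sum * pG m + (L.map bF).sum * qG m)).sum := by
          exact congrArg List.sum (List.map_congr_left (fun m _ => hper m))
      _ = (L.map aF).sum * (L.map pG).sum + (L.map bF).sum * (L.map qG).sum := by
          rw [PySem.List.sum_map_add_int, List.sum_map_mul_left, List.sum_map_mul_left]
  obtain ⟨c1, hc1⟩ := h1
  obtain ⟨c2, hc2⟩ := h2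
  exact ⟨c1 + c2, by linarith⟩

theorem getD_powFold_of_not_mem (bs : Int × Int × Int × Int) (l : List Int) {m : Int}
    (d : PySem.Dict Int (Int × Int × Int × Int)) (d0 : Int × Int × Int × Int) (hm : m ∉ l) :
    (l.foldl (fun out e => out.insert e (matPow bs e MODc)) d).getD m d0 = d.getD m d0 := by
  induction l generalizing d with
  | nil => rfl
  | cons e l ih =>
    simp only [List.foldl_cons]
    rw [ih _ (by simp at hm; exact hm.2)]
    exact PySem.Dict.getD_insert_of_ne _ _ _ (by simp at hm; exact hm.1)

theorem getD_precompute_of_mem (bs : Int × Int × Int × Int) (l : List Int) {m : Int}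
    (d0 : Int × Int × Int × Int) (hm : m ∈ l) :
    (precomputePowers l bs).getD m d0 = matPow bs m MODc := by
  unfold precomputePowers
  suffices h : ∀ d : PySem.Dict Int (Int × Int × Int × Int),
      (l.foldl (fun out e => out.insert e (matPow bs e MODc)) d).getD m d0
        = matPow bs m MODc ∨ m ∉ l by
    rcases h PySem.Dict.empty with h | h
    · exact h
    · exact absurd hm h
  clear hm
  induction l with
  | nil => intro d; right; simp
  | cons e l ih =>
    intro d
    by_cases hml : m ∈ l
    · rcases ih (d.insert e (matPow bs e MODc)) with h | h
      · left; simpa using h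
      · exact absurd hml h
    · by_cases hme : m = e
      · left
        simp only [List.foldl_cons]
        rw [getD_powFold_of_not_mem bs l _ d0 hml, hme, PySem.Dict.getD_insert_self]
      · right; simp [hml, hme]

theorem fold_fib (j : Nat) :
    (PySem.List.pyRange 2 (2 + (j : Int))).foldl fibStep [0, 1]
    = (List.range (j + 2)).map (fun i => (Nat.fib i : Int)) := by
  induction j with
  | zero =>
    rw [PySem.List.pyRange_one_eq_nil (by norm_num)]
    simp [List.range_succ]
  | succ j ih =>
    have hb : (2 : Int) + ((j : Int) + 1) = (2 + (j : Int)) + 1 := by ring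
    have h2j : (2 : Int) ≤ 2 + (j : Int) := by omega
    push_cast
    rw [hb, PySem.List.pyRange_one_succ_right h2j, List.foldl_append, ih]
    simp only [List.foldl_cons, List.foldl_nil]
    set l := (List.range (j + 2)).map (fun i => (Nat.fib i : Int)) with hl
    have hlen : l.length = j + 2 := by simp [hl]
    have hne : l ≠ [] := by
      intro h; rw [h] at hlen; simp at hlen
    unfold fibStep
    rw [PySem.List.pyGetD_neg_one l 0 hne,
        PySem.List.pyGetD_neg_ofNat l 2 0 (by norm_num) (by omega)]
    have hlast : l.getLast hne = (Nat.fib (j + 1) : Int) := by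
      rw [List.getLast_eq_getElem]
      simp [hl]
    have h2 : l[l.length - 2] = (Nat.fib j : Int) := by
      simp [hl]
    rw [hlast, h2, List.range_succ]
    simp only [List.map_append, List.map_cons, List.map_nil]
    congr 1
    have hfib : Nat.fib (j + 2) = Nat.fib j + Nat.fib (j + 1) := Nat.fib_add_two
    simp [hfib]
    ring

theorem B_fold (b : Int) (j : Nat) :
    (PySem.List.pyRange 2 (2 + (j : Int))).foldl (stepB b) (1, 1, 0, 0, 0, 0)
    = ((Nat.fib (j + 1) : Int), (Nat.fib (j + 2) : Int),
       (((PySem.List.pyRange 2 (2 + (j : Int))).map F).map aN).sum,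
       (((PySem.List.pyRange 2 (2 + (j : Int))).map F).map bN).sum,
       (((PySem.List.pyRange 2 (2 + (j : Int))).map F).map (pF b)).sum,
       (((PySem.List.pyRange 2 (2 + (j : Int))).map F).map (qF b)).sum) := by
  induction j with
  | zero =>
    rw [PySem.List.pyRange_one_eq_nil (by norm_num)]
    simp
  | succ j ih =>
    have hb : (2 : Int) + ((j : Int) + 1) = (2 + (j : Int)) + 1 := by ring
    have h2j : (2 : Int) ≤ 2 + (j : Int) := by omega
    push_cast
    rw [hb, PySem.List.pyRange_one_succ_right h2j, List.foldl_append, ih]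
    simp only [List.foldl_cons, List.foldl_nil, List.map_append, List.map_cons,
      List.map_nil, List.sum_append, List.sum_cons, List.sum_nil]
    have hF : F (2 + (j : Int)) = (Nat.fib (j + 2) : Int) := by
      unfold F
      congr 1
      congr 1
      omega
    unfold stepB
    simp only [hF]
    refine Prod.ext ?_ (Prod.ext ?_ (Prod.ext ?_ (Prod.ext ?_ (Prod.ext ?_ ?_))))
    · norm_num
    · show ((Nat.fib (j + 1) : Int) + (Nat.fib (j + 2) : Int)) = ((Nat.fib (j + 1 + 2) : Int))
      have hf3 : Nat.fib (j + 1 + 2) = Nat.fib (j + 1) + Nat.fib (j + 2) := Nat.fib_add_two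
      rw [hf3]
      push_cast
      ring
    · simp [aN]
    · simp [bN]
    · simp [pF]
    · simp [qF, pF]

theorem fibsUpto_eq {k : Int} (hk : 1 ≤ k) :
    fibsUpto k = (List.range (k.toNat + 1)).map (fun i => (Nat.fib i : Int)) := by
  have hj : k + 1 = 2 + ((k.toNat - 1 : Nat) : Int) := by omega
  have hr : k.toNat + 1 = (k.toNat - 1) + 2 := by omega
  unfold fibsUpto
  rw [if_neg (by omega), if_neg (by omega), hj, fold_fib, hr]

theorem A_val (k b : Int) (hk : 2 ≤ k) :
    S k b = PySem.Int.mod ((mkL k).foldl (fun t m =>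
        PySem.Int.mod (t + ((mkL k).map (fun n =>
          PySem.Int.mod (aN n * pF b m + bN n * qF b m) b)).sum) b) 0) b := by
  have hfib := fibsUpto_eq (show (1 : Int) ≤ k by omega)
  have hidx : (PySem.List.pyRange 2 (k + 1)).map (fun i => PySem.List.pyGetD (fibsUpto k) i 0)
      = mkL k := by
    unfold mkL
    apply List.map_congr_left
    intro i hi
    rw [PySem.List.mem_pyRange_one] at hi
    rw [hfib, PySem.List.pyGetD_eq_getElem _ _ (by omega) (by simp; omega)]
    simp [F]
  simp only [S]
  rw [hidx]
  set L := mkL k with hL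
  set u := PySem.List.sorted (PySem.Set.ofList L) (fun x => x) with hu
  have hmem : ∀ m ∈ L, m ∈ u := by
    intro m hm
    rw [hu]
    exact ((PySem.List.sorted_perm _ _ _).mem_iff).2 ((PySem.Set.mem_ofList L m).2 hm)
  congr 1
  apply PySem.List.foldl_congr_mem
  intro t m hm
  rw [getD_precompute_of_mem matM u (0, 0, 0, 0) (hmem m hm)]
  simp only [matVec, mul_zero, mul_one, zero_add]
  rw [PySem.List.foldl_congr_mem L _
    (fun acc n => acc + PySem.Int.mod (aN n * pF b m + bN n * qF b m) b) t ?_, PySem.List.foldl_add]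
  intro acc n hn
  rw [getD_precompute_of_mem matN u (0, 0, 0, 0) (hmem n hn)]
  simp only [aN, bN, pF, qF]

theorem B_val (k b : Int) (hk : 2 ≤ k) :
    S_alt k b = PySem.Int.mod (((mkL k).map aN).sum * ((mkL k).map (pF b)).sum
        + ((mkL k).map bN).sum * ((mkL k).map (qF b)).sum) b := by
  have hj : k + 1 = 2 + ((k.toNat - 1 : Nat) : Int) := by omega
  simp only [S_alt]
  unfold mkL
  rw [hj, B_fold b (k.toNat - 1)]

-- ===== VERDICT (by name: the statement is the Claim_ definition above) =====
theorem S_spec : Claim_equal_S := by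
  unfold Claim_equal_S
  intro k b _ hb
  unfold Spec_S
  unfold Pre_S at hb
  by_cases hk : k < 2
  · have hR : PySem.List.pyRange 2 (k + 1) = [] := PySem.List.pyRange_one_eq_nil (by omega)
    simp [S, S_alt, hR]
  · rw [not_lt] at hk
    rw [A_val k b hk, B_val k b hk]
    exact core b hb (mkL k) aN bN (pF b) (qF b)
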